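-- pv_equiv track=rewrite | github.com/supermaxlol/emms-sdk | src/emms/memory/hierarchical_planner.py | _match_template
-- ===== SOURCE A (Python) =====
-- def _match_template(goal_description: str) -> str:
--     """Match goal to plan template by keyword overlap."""
--     keywords = {
--         "investigate": {"investigate", "understand", "why", "analyze", "curiosity", "explore"},
--         "consolidate": {"consolidate", "deduplicate", "clean", "maintenance", "merge", "organize"},
--         "verify": {"verify", "check", "calibrate", "test", "prediction", "confirm"},
--         "monitor": {"monitor", "watch", "track", "status", "running", "health"},
--         "follow_up": {"follow", "stalling", "reminder", "obligation", "overdue", "progress"},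
--         "research": {"research", "learn", "find", "search", "discover", "study"},
--     }
--     goal_tokens = set(goal_description.lower().split())
--     best_match = "investigate"
--     best_score = 0
--     for template, kws in keywords.items():
--         score = len(goal_tokens & kws)
--         if score > best_score:
--             best_score = score
--             best_match = template
--     return best_match
-- ===== SOURCE B (Python) =====
-- _ORDER = ["investigate", "consolidate", "verify", "monitor", "follow_up", "research"]
--
-- # Inverted index: keyword -> template (keyword sets are disjoint, so this is well-defined).
-- _INDEX = {
--     "investigate": "investigate", "understand": "investigate", "why": "investigate",
--     "analyze": "investigate", "curiosity": "investigate", "explore": "investigate",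
--     "consolidate": "consolidate", "deduplicate": "consolidate", "clean": "consolidate",
--     "maintenance": "consolidate", "merge": "consolidate", "organize": "consolidate",
--     "verify": "verify", "check": "verify", "calibrate": "verify",
--     "test": "verify", "prediction": "verify", "confirm": "verify",
--     "monitor": "monitor", "watch": "monitor", "track": "monitor",
--     "status": "monitor", "running": "monitor", "health": "monitor",
--     "follow": "follow_up", "stalling": "follow_up", "reminder": "follow_up",
--     "obligation": "follow_up", "overdue": "follow_up", "progress": "follow_up",
--     "research": "research", "learn": "research", "find": "research",
--     "search": "research", "discover": "research", "study": "research",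
-- }
--
--
-- def _match_template(goal_description: str) -> str:
--     scores = {}
--     for tok in set(goal_description.lower().split()):
--         t = _INDEX.get(tok)
--         if t is not None:
--             scores[t] = scores.get(t, 0) + 1
--     best_match, best_score = "investigate", 0
--     for t in _ORDER:
--         s = scores.get(t, 0)
--         if s > best_score:
--             best_match, best_score = t, s
--     return best_match
-- ===== Notes on version B (the rewrite author's own statement) =====
-- stated objective: alternative
-- what changed: Replaces the per-template set-intersection loop by a precomputed inverted keyword-to-template index and a single counting pass over the goal tokens, then selects the winner over the fixed template order with strict >.
import Mathlib
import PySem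

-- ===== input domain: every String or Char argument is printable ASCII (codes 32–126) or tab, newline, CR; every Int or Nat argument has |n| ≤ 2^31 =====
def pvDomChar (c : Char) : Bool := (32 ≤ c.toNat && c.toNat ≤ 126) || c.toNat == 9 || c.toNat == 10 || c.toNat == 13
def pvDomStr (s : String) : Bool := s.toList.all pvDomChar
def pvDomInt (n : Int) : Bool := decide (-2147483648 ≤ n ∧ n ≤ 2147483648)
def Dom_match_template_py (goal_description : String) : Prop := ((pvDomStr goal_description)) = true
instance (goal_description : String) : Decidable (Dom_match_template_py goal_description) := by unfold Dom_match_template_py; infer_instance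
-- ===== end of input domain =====

-- B replaces A's per-template set intersections by one inverted keyword→template index and a
-- single counting pass over the tokens (objective: alternative decomposition; same winner and ties).

-- ===== PORT A =====
def pvKeywordsA : List (String × PySem.Set String) :=
  [ ("investigate", PySem.Set.ofList ["investigate", "understand", "why", "analyze", "curiosity", "explore"]),
    ("consolidate", PySem.Set.ofList ["consolidate", "deduplicate", "clean", "maintenance", "merge", "organize"]),
    ("verify", PySem.Set.ofList ["verify", "check", "calibrate", "test", "prediction", "confirm"]),
    ("monitor", PySem.Set.ofList ["monitor", "watch", "track", "status", "running", "health"]),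
    ("follow_up", PySem.Set.ofList ["follow", "stalling", "reminder", "obligation", "overdue", "progress"]),
    ("research", PySem.Set.ofList ["research", "learn", "find", "search", "discover", "study"]) ]

def match_template_py (goal_description : String) : String :=
  let goal_tokens : PySem.Set String :=
    PySem.Set.ofList (PySem.Str.split₀ (PySem.Str.lower goal_description))
  let r := pvKeywordsA.foldl
    (fun (acc : String × Int) p =>
      let score : Int := PySem.Set.len (PySem.Set.inter goal_tokens p.2)
      if score > acc.2 then (p.1, score) else acc)
    ("investigate", 0)
  r.1

-- ===== PORT B =====
def pvOrderB : List String :=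
  ["investigate", "consolidate", "verify", "monitor", "follow_up", "research"]

def pvIndexB : PySem.Dict String String :=
  PySem.Dict.ofList
  [ ("investigate", "investigate"), ("understand", "investigate"), ("why", "investigate"),
    ("analyze", "investigate"), ("curiosity", "investigate"), ("explore", "investigate"),
    ("consolidate", "consolidate"), ("deduplicate", "consolidate"), ("clean", "consolidate"),
    ("maintenance", "consolidate"), ("merge", "consolidate"), ("organize", "consolidate"),
    ("verify", "verify"), ("check", "verify"), ("calibrate", "verify"),
    ("test", "verify"), ("prediction", "verify"), ("confirm", "verify"),
    ("monitor", "monitor"), ("watch", "monitor"), ("track", "monitor"),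
    ("status", "monitor"), ("running", "monitor"), ("health", "monitor"),
    ("follow", "follow_up"), ("stalling", "follow_up"), ("reminder", "follow_up"),
    ("obligation", "follow_up"), ("overdue", "follow_up"), ("progress", "follow_up"),
    ("research", "research"), ("learn", "research"), ("find", "research"),
    ("search", "research"), ("discover", "research"), ("study", "research") ]

def pvScoresB (toks : List String) : PySem.Dict String Int :=
  toks.foldl
    (fun (d : PySem.Dict String Int) tok =>
      match pvIndexB.get? tok with
      | some t => d.modify t 0 (· + 1)
      | none => d)
    PySem.Dict.empty

def match_template_py_alt (goal_description : String) : String :=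
  let toks : PySem.Set String :=
    PySem.Set.ofList (PySem.Str.split₀ (PySem.Str.lower goal_description))
  let scores := pvScoresB toks
  let r := pvOrderB.foldl
    (fun (acc : String × Int) t =>
      let s := scores.getD t 0
      if s > acc.2 then (t, s) else acc)
    ("investigate", 0)
  r.1

-- ===== PRECONDITION & SPEC =====
def Spec_match_template_py (goal_description : String) (out : String) : Prop := out = match_template_py_alt goal_description
instance (goal_description : String) (out : String) : Decidable (Spec_match_template_py goal_description out) := by unfold Spec_match_template_py; infer_instance

-- ===== CLAIM (what is proved, stated in full; the proofs are below) =====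
def Claim_equal_match_template_py : Prop := ∀ (goal_description : String), Dom_match_template_py goal_description → Spec_match_template_py goal_description (match_template_py goal_description)

-- ===== LEMMAS AND PROOFS =====

-- Counting invariant for B's loop: the accumulated score of template t counts the tokens the index maps to t.
theorem pvScoresB_getD (toks : List String) (t : String) :
    (pvScoresB toks).getD t 0 =
      ((toks.filter (fun tok => decide (pvIndexB.get? tok = some t))).length : Int) := by
  suffices h : ∀ (d : PySem.Dict String Int),
      (toks.foldl
        (fun (d : PySem.Dict String Int) tok =>
          match pvIndexB.get? tok with
          | some t => d.modify t 0 (· + 1)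
          | none => d) d).getD t 0 =
      d.getD t 0 + ((toks.filter (fun tok => decide (pvIndexB.get? tok = some t))).length : Int) by
    have := h PySem.Dict.empty
    simpa [pvScoresB] using this
  induction toks with
  | nil => intro d; simp
  | cons tok rest ih =>
    intro d
    rcases hidx : pvIndexB.get? tok with _ | u
    · simp [List.foldl_cons, hidx, ih]
    · by_cases hu : u = t
      · subst hu
        simp [List.foldl_cons, hidx, ih]
        ring
      · simp [List.foldl_cons, hidx, ih, PySem.Dict.getD_modify, hu, Ne.symm hu]

-- The inverted index agrees with each template's keyword set.
set_option maxRecDepth 8192 in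
theorem pvIndex_mem (tok t : String) (kws : List String)
    (hmem : ∀ x, (x, t) ∈
        ([ ("investigate", "investigate"), ("understand", "investigate"), ("why", "investigate"),
           ("analyze", "investigate"), ("curiosity", "investigate"), ("explore", "investigate"),
           ("consolidate", "consolidate"), ("deduplicate", "consolidate"), ("clean", "consolidate"),
           ("maintenance", "consolidate"), ("merge", "consolidate"), ("organize", "consolidate"),
           ("verify", "verify"), ("check", "verify"), ("calibrate", "verify"),
           ("test", "verify"), ("prediction", "verify"), ("confirm", "verify"),
           ("monitor", "monitor"), ("watch", "monitor"), ("track", "monitor"),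
           ("status", "monitor"), ("running", "monitor"), ("health", "monitor"),
           ("follow", "follow_up"), ("stalling", "follow_up"), ("reminder", "follow_up"),
           ("obligation", "follow_up"), ("overdue", "follow_up"), ("progress", "follow_up"),
           ("research", "research"), ("learn", "research"), ("find", "research"),
           ("search", "research"), ("discover", "research"), ("study", "research") ] :
          List (String × String)) ↔ x ∈ kws) :
    (pvIndexB.get? tok = some t) ↔ tok ∈ kws := by
  rw [PySem.Dict.get?_eq_some_iff_mem_items _ _ _ (by decide)]
  have hitems : pvIndexB.items =
      [ ("investigate", "investigate"), ("understand", "investigate"), ("why", "investigate"),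
        ("analyze", "investigate"), ("curiosity", "investigate"), ("explore", "investigate"),
        ("consolidate", "consolidate"), ("deduplicate", "consolidate"), ("clean", "consolidate"),
        ("maintenance", "consolidate"), ("merge", "consolidate"), ("organize", "consolidate"),
        ("verify", "verify"), ("check", "verify"), ("calibrate", "verify"),
        ("test", "verify"), ("prediction", "verify"), ("confirm", "verify"),
        ("monitor", "monitor"), ("watch", "monitor"), ("track", "monitor"),
        ("status", "monitor"), ("running", "monitor"), ("health", "monitor"),
        ("follow", "follow_up"), ("stalling", "follow_up"), ("reminder", "follow_up"),
        ("obligation", "follow_up"), ("overdue", "follow_up"), ("progress", "follow_up"),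
        ("research", "research"), ("learn", "research"), ("find", "research"),
        ("search", "research"), ("discover", "research"), ("study", "research") ] := by decide
  rw [hitems]
  exact hmem tok

-- A's score is the length of the same filter, for any token list.
theorem pvInter_len (toks : List String) (kws : List String) :
    PySem.Set.len (PySem.Set.inter toks (PySem.Set.ofList kws)) =
      ((toks.filter (fun tok => decide (tok ∈ kws))).length : Int) := by
  simp [PySem.Set.len, PySem.Set.inter, PySem.Set.mem_ofList]

set_option maxRecDepth 8192 in
theorem pvScore_eq (toks : List String) (t : String) (kws : List String)
    (h : ∀ tok : String, (pvIndexB.get? tok = some t) ↔ tok ∈ kws) :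
    (pvScoresB toks).getD t 0 = PySem.Set.len (PySem.Set.inter toks (PySem.Set.ofList kws)) := by
  rw [pvScoresB_getD, pvInter_len]
  congr 2
  apply List.filter_congr
  intro tok _
  simp [h tok]

-- ===== VERDICT (by name: the statement is the Claim_ definition above) =====
theorem match_template_py_spec : Claim_equal_match_template_py := by
  intro s _
  unfold Spec_match_template_py match_template_py match_template_py_alt
  generalize PySem.Set.ofList (PySem.Str.split₀ (PySem.Str.lower s)) = toks
  have h1 := pvScore_eq toks "investigate"
    ["investigate", "understand", "why", "analyze", "curiosity", "explore"]
    (fun tok => pvIndex_mem tok _ _ (by intro x; simp))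
  have h2 := pvScore_eq toks "consolidate"
    ["consolidate", "deduplicate", "clean", "maintenance", "merge", "organize"]
    (fun tok => pvIndex_mem tok _ _ (by intro x; simp))
  have h3 := pvScore_eq toks "verify"
    ["verify", "check", "calibrate", "test", "prediction", "confirm"]
    (fun tok => pvIndex_mem tok _ _ (by intro x; simp))
  have h4 := pvScore_eq toks "monitor"
    ["monitor", "watch", "track", "status", "running", "health"]
    (fun tok => pvIndex_mem tok _ _ (by intro x; simp))
  have h5 := pvScore_eq toks "follow_up"
    ["follow", "stalling", "reminder", "obligation", "overdue", "progress"]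
    (fun tok => pvIndex_mem tok _ _ (by intro x; simp))
  have h6 := pvScore_eq toks "research"
    ["research", "learn", "find", "search", "discover", "study"]
    (fun tok => pvIndex_mem tok _ _ (by intro x; simp))
  simp only [pvKeywordsA, pvOrderB, List.foldl_cons, List.foldl_nil]
  rw [h1, h2, h3, h4, h5, h6]
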